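-- pv_equiv track=rewrite | github.com/nolouch/code_indexer | file_indexer/database.py | split_content_into_chunks
-- ===== SOURCE A (Python) =====
-- def split_content_into_chunks(content, lines_per_chunk=200):
--     """Split content into chunks of specified number of lines
--
--     Args:
--         content: File content
--         lines_per_chunk: Maximum number of lines per chunk
--
--     Returns:
--         Tuple containing: (List of content chunks, total line count)
--     """
--     lines = content.splitlines(keepends=True)
--     total_lines = len(lines)
--     chunks = []
--
--     # Calculate how many chunks are needed
--     num_chunks = (total_lines + lines_per_chunk - 1) // lines_per_chunk
--
--     for i in range(num_chunks):
--         start_line = i * lines_per_chunk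
--         end_line = min((i + 1) * lines_per_chunk, total_lines)
--         chunk_lines = lines[start_line:end_line]
--         chunk = ''.join(chunk_lines)
--         # Store line range metadata in the chunk content
--         line_range = f"LINES:{start_line+1}-{end_line}"
--         chunks.append((chunk, line_range, start_line+1, end_line))
--
--     return chunks, total_lines
-- ===== SOURCE B (Python) =====
-- def split_content_into_chunks(content, lines_per_chunk=200):
--     """Split content into chunks of specified number of lines (streaming single pass)."""
--     lines = content.splitlines(keepends=True)
--     total_lines = len(lines)
--     chunks = []
--     buf = []
--     start = 0  # 0-based index of the first line of the current buffer
--     for idx, line in enumerate(lines, 1):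
--         buf.append(line)
--         if len(buf) == lines_per_chunk:
--             chunks.append((''.join(buf), f"LINES:{start+1}-{idx}", start + 1, idx))
--             buf = []
--             start = idx
--     if buf:
--         chunks.append((''.join(buf), f"LINES:{start+1}-{total_lines}", start + 1, total_lines))
--     return chunks, total_lines
-- ===== Notes on version B (the rewrite author's own statement) =====
-- stated objective: alternative
-- what changed: Replaces A's up-front chunk-count division plus per-chunk list slicing with a single streaming pass that accumulates lines in a buffer and emits a chunk whenever the buffer reaches lines_per_chunk, flushing the remainder at the end.
-- outside the precondition, e.g. on split_content_into_chunks('a\nb', 0): A raises ZeroDivisionError, B returns ([('a\nb', 'LINES:1-2', 1, 2)], 2); on split_content_into_chunks('a\nb', -1): A returns ([], 2), B returns ([('a\nb', 'LINES:1-2', 1, 2)], 2)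
import Mathlib
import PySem

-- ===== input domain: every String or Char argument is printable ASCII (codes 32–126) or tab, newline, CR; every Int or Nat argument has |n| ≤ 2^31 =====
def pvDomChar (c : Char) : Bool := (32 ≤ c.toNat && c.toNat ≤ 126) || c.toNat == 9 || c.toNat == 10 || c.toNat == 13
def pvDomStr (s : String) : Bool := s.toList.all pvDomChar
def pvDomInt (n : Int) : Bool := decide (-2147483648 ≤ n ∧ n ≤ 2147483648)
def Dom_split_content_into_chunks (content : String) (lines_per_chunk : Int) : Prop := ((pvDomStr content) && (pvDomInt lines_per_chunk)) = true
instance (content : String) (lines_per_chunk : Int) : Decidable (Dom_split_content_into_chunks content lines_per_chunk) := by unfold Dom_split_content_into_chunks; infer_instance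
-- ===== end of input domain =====

-- B replaces A's up-front division and per-chunk slicing by one streaming pass with a line buffer
-- (same O(n) cost, different decomposition); return values proved equal for lines_per_chunk ≥ 1.

-- ===== PORT A =====
-- content.splitlines(keepends=True), exact on the Dom alphabet (line breaks there are '\n', '\r', '\r\n');
-- used by both ports, as both Pythons make this same library call.
def pvSplitKeepGo : List Char → List Char → List String
  | [], acc => if acc.isEmpty then [] else [String.ofList acc.reverse]
  | '\n' :: rest, acc => String.ofList (acc.reverse ++ ['\n']) :: pvSplitKeepGo rest []
  | '\r' :: '\n' :: rest, acc => String.ofList (acc.reverse ++ ['\r', '\n']) :: pvSplitKeepGo rest []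
  | '\r' :: rest, acc => String.ofList (acc.reverse ++ ['\r']) :: pvSplitKeepGo rest []
  | c :: rest, acc => pvSplitKeepGo rest (c :: acc)

def pvSplitKeep (s : String) : List String := pvSplitKeepGo s.toList []

def split_content_into_chunks (content : String) (lines_per_chunk : Int) : (List (String × String × Int × Int)) × Int :=
  let lines := pvSplitKeep content
  let total_lines : Int := lines.length
  let num_chunks := PySem.Int.floordiv (total_lines + lines_per_chunk - 1) lines_per_chunk
  let chunks := (PySem.List.pyRange 0 num_chunks 1).foldl (fun chunks i =>
      let start_line := i * lines_per_chunk
      let end_line := min ((i + 1) * lines_per_chunk) total_lines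
      let chunk_lines := PySem.List.slice lines (some start_line) (some end_line)
      let chunk := PySem.Str.join "" chunk_lines
      let line_range := "LINES:" ++ PySem.Int.toStr (start_line + 1) ++ "-" ++ PySem.Int.toStr end_line
      chunks ++ [(chunk, line_range, start_line + 1, end_line)]) []
  (chunks, total_lines)

-- ===== PORT B =====
def split_content_into_chunks_alt (content : String) (lines_per_chunk : Int) : (List (String × String × Int × Int)) × Int :=
  let lines := pvSplitKeep content
  let total_lines : Int := lines.length
  let st := lines.foldl (fun (s : (List (String × String × Int × Int)) × List String × Int × Int) line =>
      let chunks := s.1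
      let buf := s.2.1 ++ [line]
      let start := s.2.2.1
      let idx := s.2.2.2 + 1
      if (buf.length : Int) = lines_per_chunk then
        (chunks ++ [(PySem.Str.join "" buf,
                     "LINES:" ++ PySem.Int.toStr (start + 1) ++ "-" ++ PySem.Int.toStr idx,
                     start + 1, idx)], [], idx, idx)
      else (chunks, buf, start, idx)) ([], [], 0, 0)
  if st.2.1.isEmpty then (st.1, total_lines)
  else (st.1 ++ [(PySem.Str.join "" st.2.1,
                  "LINES:" ++ PySem.Int.toStr (st.2.2.1 + 1) ++ "-" ++ PySem.Int.toStr total_lines,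
                  st.2.2.1 + 1, total_lines)], total_lines)

-- ===== PRECONDITION & SPEC =====
-- Pre_ excludes lines_per_chunk ≤ 0: at 0 the Python A raises ZeroDivisionError, and a negative
-- chunk size is outside the function's natural domain (A's values there — an empty chunk list, or
-- chunks with negative end lines — are accidents of its ceiling-division loop bound).
def Pre_split_content_into_chunks (content : String) (lines_per_chunk : Int) : Prop :=
  1 ≤ lines_per_chunk
instance (content : String) (lines_per_chunk : Int) : Decidable (Pre_split_content_into_chunks content lines_per_chunk) := by unfold Pre_split_content_into_chunks; infer_instance

def pvWitness_split_content_into_chunks : String × Int := ("a\nb\nc", 2)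

def Spec_split_content_into_chunks (content : String) (lines_per_chunk : Int) (out : (List (String × String × Int × Int)) × Int) : Prop := out = split_content_into_chunks_alt content lines_per_chunk
instance (content : String) (lines_per_chunk : Int) (out : (List (String × String × Int × Int)) × Int) : Decidable (Spec_split_content_into_chunks content lines_per_chunk out) := by unfold Spec_split_content_into_chunks; infer_instance

-- ===== CLAIM (what is proved, stated in full; the proofs are below) =====
def Claim_equal_split_content_into_chunks : Prop := ∀ (content : String) (lines_per_chunk : Int), Dom_split_content_into_chunks content lines_per_chunk → Pre_split_content_into_chunks content lines_per_chunk → Spec_split_content_into_chunks content lines_per_chunk (split_content_into_chunks content lines_per_chunk)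

-- ===== LEMMAS AND PROOFS =====

-- A common description of the chunk list: take L lines at a time, carrying the 0-based position.
def pvChunk (buf : List String) (s e : Int) : String × String × Int × Int :=
  (PySem.Str.join "" buf, "LINES:" ++ PySem.Int.toStr s ++ "-" ++ PySem.Int.toStr e, s, e)

def pvSpecChunks (L : Nat) (pos : Nat) : List String → List (String × String × Int × Int)
  | [] => []
  | x :: rest =>
      pvChunk (x :: rest.take (L - 1)) ((pos : Int) + 1) ((pos : Int) + (min L (rest.length + 1) : Nat))
        :: pvSpecChunks L (pos + L) (rest.drop (L - 1))
termination_by xs => xs.length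
decreasing_by
  simp only [List.length_drop, List.length_cons]; omega

theorem pvSpecChunks_nil (L pos : Nat) : pvSpecChunks L pos [] = [] := by
  rw [pvSpecChunks]

theorem pvSpecChunks_cons (L pos : Nat) (x : String) (rest : List String) :
    pvSpecChunks L pos (x :: rest) =
      pvChunk (x :: rest.take (L - 1)) ((pos : Int) + 1) ((pos : Int) + (min L (rest.length + 1) : Nat))
        :: pvSpecChunks L (pos + L) (rest.drop (L - 1)) := by
  rw [pvSpecChunks]

-- B's loop body, named for the proofs (definitionally the lambda in split_content_into_chunks_alt).
def pvBStep (lines_per_chunk : Int)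
    (s : (List (String × String × Int × Int)) × List String × Int × Int) (line : String) :
    (List (String × String × Int × Int)) × List String × Int × Int :=
  let chunks := s.1
  let buf := s.2.1 ++ [line]
  let start := s.2.2.1
  let idx := s.2.2.2 + 1
  if (buf.length : Int) = lines_per_chunk then
    (chunks ++ [(PySem.Str.join "" buf,
                 "LINES:" ++ PySem.Int.toStr (start + 1) ++ "-" ++ PySem.Int.toStr idx,
                 start + 1, idx)], [], idx, idx)
  else (chunks, buf, start, idx)

theorem pvBStep_chunk (lpc : Int) (s) (line) :
    pvBStep lpc s line =
      if ((s.2.1.length + 1 : Nat) : Int) = lpc then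
        (s.1 ++ [pvChunk (s.2.1 ++ [line]) (s.2.2.1 + 1) (s.2.2.2 + 1)], [], s.2.2.2 + 1, s.2.2.2 + 1)
      else (s.1, s.2.1 ++ [line], s.2.2.1, s.2.2.2 + 1) := by
  simp [pvBStep, pvChunk]

theorem pvBfold_nofill (L : Nat) :
    ∀ (xs : List String) (chunks : List (String × String × Int × Int)) (buf : List String)
      (start k : Int), buf.length + xs.length < L →
      xs.foldl (pvBStep (L : Int)) (chunks, buf, start, k) =
        (chunks, buf ++ xs, start, k + xs.length) := by
  intro xs
  induction xs with
  | nil => intro chunks buf start k _; simp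
  | cons x xs ih =>
      intro chunks buf start k h
      simp only [List.foldl_cons, pvBStep_chunk]
      rw [if_neg (by simp at h ⊢; omega)]
      rw [ih _ (buf ++ [x]) start (k + 1) (by simp at h ⊢; omega)]
      simp; omega

theorem pvBfold_fill (L : Nat) :
    ∀ (xs : List String) (chunks : List (String × String × Int × Int)) (buf : List String)
      (start k : Int), buf.length + xs.length = L → xs ≠ [] →
      xs.foldl (pvBStep (L : Int)) (chunks, buf, start, k) =
        (chunks ++ [pvChunk (buf ++ xs) (start + 1) (k + xs.length)], [], k + xs.length, k + xs.length) := by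
  intro xs
  induction xs with
  | nil => intro _ _ _ _ _ hne; exact absurd rfl hne
  | cons x xs ih =>
      intro chunks buf start k h _
      simp only [List.foldl_cons, pvBStep_chunk]
      by_cases hxs : xs = []
      · subst hxs
        rw [if_pos (by simp at h ⊢; omega)]
        simp
      · have hpos : 0 < xs.length := List.length_pos_iff.mpr hxs
        rw [if_neg (by simp at h ⊢; omega)]
        rw [ih _ (buf ++ [x]) start (k + 1) (by simp at h ⊢; omega) hxs]
        have h1 : buf ++ [x] ++ xs = buf ++ x :: xs := by simp
        have h2 : k + 1 + (xs.length : Int) = k + ((x :: xs).length : Int) := by simp; omega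
        rw [h1, h2]

theorem pvBRun (L : Nat) (hL : 1 ≤ L) (pos : Nat) (lines : List String) :
    ∀ (chunks : List (String × String × Int × Int)),
      (let st := lines.foldl (pvBStep (L : Int)) (chunks, [], (pos : Int), (pos : Int))
       if st.2.1.isEmpty then st.1
       else st.1 ++ [pvChunk st.2.1 (st.2.2.1 + 1) ((pos : Int) + lines.length)])
      = chunks ++ pvSpecChunks L pos lines := by
  induction pos, lines using pvSpecChunks.induct L with
  | case1 pos => intro chunks; simp [pvSpecChunks_nil]
  | case2 pos x rest ih =>
      intro chunks
      rw [pvSpecChunks_cons]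
      by_cases hlen : rest.length + 1 < L
      · rw [pvBfold_nofill L (x :: rest) chunks [] (pos : Int) (pos : Int) (by simp; omega)]
        have htake : rest.take (L - 1) = rest := List.take_of_length_le (by omega)
        have hdrop : rest.drop (L - 1) = [] := List.drop_eq_nil_of_le (by omega)
        have hmin : min L (rest.length + 1) = rest.length + 1 := by omega
        simp [htake, hdrop, hmin, pvSpecChunks_nil]
      · have hL' : L ≤ rest.length + 1 := by omega
        have hsplit : x :: rest = List.take L (x :: rest) ++ List.drop L (x :: rest) :=
          (List.take_append_drop L (x :: rest)).symm
        rw [show (x :: rest).foldl (pvBStep (L : Int)) (chunks, [], (pos : Int), (pos : Int))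
              = (List.drop L (x :: rest)).foldl (pvBStep (L : Int))
                  ((List.take L (x :: rest)).foldl (pvBStep (L : Int)) (chunks, [], (pos : Int), (pos : Int)))
            from by rw [← List.foldl_append, ← hsplit]]
        have hlt : (List.take L (x :: rest)).length = L := by
          simp [List.length_take]; omega
        rw [pvBfold_fill L (List.take L (x :: rest)) chunks [] (pos : Int) (pos : Int)
              (by simp [hlt]) (by simp; omega)]
        rw [hlt]
        have hk : ((pos : Int) + (L : Int)) = ((pos + L : Nat) : Int) := by push_cast; ring
        rw [hk]
        have hdrop2 : List.drop L (x :: rest) = rest.drop (L - 1) := by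
          cases L with
          | zero => omega
          | succ n => simp [List.drop_succ_cons]
        rw [hdrop2]
        have hend : ((pos : Int) + ((x :: rest).length : Int))
            = ((pos + L : Nat) : Int) + ((rest.drop (L - 1)).length : Int) := by
          simp [List.length_drop]; omega
        rw [hend]
        simp only [List.nil_append]
        rw [ih (chunks ++ [pvChunk (List.take L (x :: rest)) ((pos : Int) + 1) ((pos + L : Nat) : Int)])]
        have htake2 : List.take L (x :: rest) = x :: rest.take (L - 1) := by
          cases L with
          | zero => omega
          | succ n => simp [List.take_succ_cons]
        have hmin : min L (rest.length + 1) = L := by omega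
        rw [htake2, hmin, hk]
        simp

theorem pvFoldl_append_singleton {α β : Type} (f : α → β) :
    ∀ (l : List α) (init : List β),
      l.foldl (fun acc x => acc ++ [f x]) init = init ++ l.map f := by
  intro l
  induction l with
  | nil => intro init; simp
  | cons x xs ih => intro init; simp [ih]

theorem pvSliceChunk (xs : List String) (k L : Nat) :
    PySem.List.slice xs (some ((k : Int) * (L : Int)))
      (some (min (((k : Int) + 1) * (L : Int)) (xs.length : Int)))
    = (xs.drop (k * L)).take (min ((k + 1) * L) xs.length - k * L) := by
  have h1 : (k : Int) * (L : Int) = ((k * L : Nat) : Int) := by push_cast; ring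
  have h2 : ((k : Int) + 1) * (L : Int) = (((k + 1) * L : Nat) : Int) := by push_cast; ring
  have h3 : min ((((k + 1) * L : Nat) : Nat) : Int) ((xs.length : Nat) : Int)
      = ((min ((k + 1) * L) xs.length : Nat) : Int) := (Nat.cast_min _ _).symm
  rw [h1, h2, h3, PySem.List.slice_natCast]

theorem pvARun (L : Nat) (hL : 1 ≤ L) (pos : Nat) (lines : List String) :
    (List.range ((lines.length + L - 1) / L)).map (fun (k : Nat) =>
      pvChunk (PySem.List.slice lines (some ((k : Int) * (L : Int)))
                 (some (min (((k : Int) + 1) * (L : Int)) (lines.length : Int))))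
              ((pos : Int) + (k : Int) * (L : Int) + 1)
              ((pos : Int) + min (((k : Int) + 1) * (L : Int)) (lines.length : Int)))
    = pvSpecChunks L pos lines := by
  induction pos, lines using pvSpecChunks.induct L with
  | case1 pos =>
      rw [pvSpecChunks_nil]
      have h0 : ((([] : List String).length + L - 1) / L) = 0 := Nat.div_eq_of_lt (by simp; omega)
      rw [h0]; simp
  | case2 pos x rest ih =>
      rw [pvSpecChunks_cons]
      by_cases hc : rest.length + 1 ≤ L
      · have hN : (((x :: rest).length + L - 1) / L) = 1 := by
          apply Nat.div_eq_of_lt_le <;> simp <;> try omega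
        rw [hN]
        have hdrop : rest.drop (L - 1) = [] := List.drop_eq_nil_of_le (by omega)
        have htake : rest.take (L - 1) = rest := List.take_of_length_le (by omega)
        rw [hdrop, pvSpecChunks_nil, List.range_one, List.map_cons, List.map_nil]
        congr 1
        rw [pvSliceChunk]
        have hb : ((x :: rest).drop ((0 : Nat) * L)).take (min ((0 + 1) * L) (x :: rest).length - (0 : Nat) * L)
            = x :: rest.take (L - 1) := by
          rw [htake, Nat.zero_mul, List.drop_zero, Nat.sub_zero, Nat.one_mul]
          have : min L (x :: rest).length = (x :: rest).length := by simp; omega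
          rw [this, List.take_length]
        rw [hb]
        congr 1
        · push_cast; ring
        · simp only [List.length_cons]; push_cast; omega
      · have hL2 : L ≤ rest.length := by omega
        have hN : ((x :: rest).length + L - 1) / L
            = ((List.drop (L - 1) rest).length + L - 1) / L + 1 := by
          simp only [List.length_cons, List.length_drop]
          rw [show rest.length + 1 + L - 1 = rest.length + L from by omega,
              show rest.length - (L - 1) + L - 1 = rest.length from by omega,
              Nat.add_div_right _ (by omega)]
        rw [hN, List.range_succ_eq_map, List.map_cons, List.map_map]
        congr 1
        · rw [pvSliceChunk]
          have hb : ((x :: rest).drop ((0 : Nat) * L)).take (min ((0 + 1) * L) (x :: rest).length - (0 : Nat) * L)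
              = x :: rest.take (L - 1) := by
            rw [Nat.zero_mul, List.drop_zero, Nat.sub_zero, Nat.one_mul]
            have hm : min L (x :: rest).length = L := by simp; omega
            rw [hm]
            cases L with
            | zero => omega
            | succ n => simp [List.take_succ_cons]
          rw [hb]
          congr 1
          · push_cast; ring
          · simp only [List.length_cons]; push_cast; omega
        · rw [← ih]
          apply List.map_congr_left
          intro k _
          simp only [Function.comp_apply]
          rw [pvSliceChunk, pvSliceChunk]
          have hbuf : ((x :: rest).drop ((k + 1) * L)).take
                (min ((k + 1 + 1) * L) (x :: rest).length - (k + 1) * L)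
              = ((List.drop (L - 1) rest).drop (k * L)).take
                (min ((k + 1) * L) (List.drop (L - 1) rest).length - k * L) := by
            rw [List.drop_drop]
            rw [show (k + 1) * L = (k * L + (L - 1)) + 1 from by
                  rw [Nat.succ_mul]; omega,
                List.drop_succ_cons]
            rw [show L - 1 + k * L = k * L + (L - 1) from by omega]
            congr 1
            simp only [List.length_cons, List.length_drop]
            rw [show (k + 1 + 1) * L = k * L + L + L from by rw [Nat.succ_mul, Nat.succ_mul],
                show (k * L + (L - 1)) + 1 = k * L + L from by omega]
            generalize k * L = a
            omega
          rw [hbuf]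
          congr 1
          · push_cast; ring
          · simp only [List.length_cons, List.length_drop]
            rw [Nat.cast_sub (by omega : L - 1 ≤ rest.length)]
            push_cast
            rw [show ((k : Int) + 1 + 1) * L = k * L + L + L from by ring,
                show ((k : Int) + 1) * L = k * L + L from by ring]
            generalize (k : Int) * (L : Int) = a
            omega

def pvAF (lpc : Int) (lines : List String) (i : Int) : String × String × Int × Int :=
  pvChunk (PySem.List.slice lines (some (i * lpc)) (some (min ((i + 1) * lpc) (lines.length : Int))))
          (i * lpc + 1) (min ((i + 1) * lpc) (lines.length : Int))

theorem pvA_eq0 (content : String) (lpc : Int) :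
    split_content_into_chunks content lpc =
      ((PySem.List.pyRange 0
          (PySem.Int.floordiv (((pvSplitKeep content).length : Int) + lpc - 1) lpc) 1).foldl
            (fun acc i => acc ++ [pvAF lpc (pvSplitKeep content) i]) [],
       ((pvSplitKeep content).length : Int)) := rfl

theorem pvB_eq0 (content : String) (lpc : Int) :
    split_content_into_chunks_alt content lpc =
      (let st := (pvSplitKeep content).foldl (pvBStep lpc) ([], [], 0, 0)
       if st.2.1.isEmpty then (st.1, ((pvSplitKeep content).length : Int))
       else (st.1 ++ [pvChunk st.2.1 (st.2.2.1 + 1) (((pvSplitKeep content).length : Nat) : Int)],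
             ((pvSplitKeep content).length : Int))) := rfl

theorem split_content_into_chunks_spec : Claim_equal_split_content_into_chunks := by
  intro content lpc _ hPre
  unfold Pre_split_content_into_chunks at hPre
  unfold Spec_split_content_into_chunks
  have h0 : (0 : Int) ≤ lpc := by omega
  have hlpc : lpc = ((lpc.toNat : Nat) : Int) := (Int.toNat_of_nonneg h0).symm
  have hL1 : 1 ≤ lpc.toNat := by omega
  set L := lpc.toNat with hLdef
  set lines := pvSplitKeep content with hlines
  -- A side
  have hA : split_content_into_chunks content lpc = (pvSpecChunks L 0 lines, (lines.length : Int)) := by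
    rw [pvA_eq0, ← hlines]
    have hfd : PySem.Int.floordiv ((lines.length : Int) + lpc - 1) lpc
        = (((lines.length + L - 1) / L : Nat) : Int) := by
      rw [hlpc]
      rw [show ((lines.length : Int) + (L : Int) - 1) = (((lines.length + L - 1 : Nat)) : Int) from by
            rw [Nat.cast_sub (by omega)]; push_cast; ring]
      exact PySem.Int.floordiv_natCast _ _
    rw [hfd, PySem.List.pyRange_one]
    have harun := pvARun L hL1 0 lines
    simp only [Nat.cast_zero, zero_add] at harun
    rw [pvFoldl_append_singleton, List.map_map]
    simp only [Int.sub_zero, Int.toNat_natCast, List.nil_append]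
    rw [← harun]
    apply congrArg (fun c => (c, (lines.length : Int)))
    apply List.map_congr_left
    intro k _
    simp only [Function.comp_apply, zero_add, pvAF]
    rw [hlpc]
  -- B side
  have hB : split_content_into_chunks_alt content lpc = (pvSpecChunks L 0 lines, (lines.length : Int)) := by
    rw [pvB_eq0, ← hlines]
    have hbrun := pvBRun L hL1 0 lines []
    simp only [Nat.cast_zero, zero_add, List.nil_append] at hbrun
    rw [hlpc]
    rw [← apply_ite (fun c : List (String × String × Int × Int) => (c, ((lines.length : Nat) : Int)))]
    rw [hbrun]
  rw [hA, hB]
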